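-- pv_equiv track=rewrite | github.com/bhburnstein/si_507_final_project | app.py | populate_countries
-- ===== SOURCE A (Python) =====
-- def populate_countries(list_of_info):
--     '''Creates a dictionary with a country as the key
--     and a number as the value to be used as a foreign key.
--
--     Parameters
--     ----------
--     list_of_info: list
--         The complete list of dog information.
--
--     Returns
--     -------
--     dictionary
--         Country-Id in a key-value pair.
--     '''
--     countries = {}
--     counter = 0
--     for list_item in list_of_info:
--         country = list_item[3]
--         if country not in countries:
--             counter += 1
--             countries[country] = counter
--         else:
--             country = countries[country]
--     return countries
-- ===== SOURCE B (Python) =====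
-- def populate_countries(list_of_info):
--     keys = [list_item[3] for list_item in list_of_info]
--     distinct = sorted(set(keys), key=keys.index)
--     return {country: rank + 1 for rank, country in enumerate(distinct)}
-- ===== Notes on version B (the rewrite author's own statement) =====
-- stated objective: alternative
-- what changed: Replaces A's single branching dict-and-counter accumulator loop with a rank-by-first-occurrence computation: extract the key column, take its set, sort the distinct keys by their first index in the column, and map each to its 1-based rank.
import Mathlib
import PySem

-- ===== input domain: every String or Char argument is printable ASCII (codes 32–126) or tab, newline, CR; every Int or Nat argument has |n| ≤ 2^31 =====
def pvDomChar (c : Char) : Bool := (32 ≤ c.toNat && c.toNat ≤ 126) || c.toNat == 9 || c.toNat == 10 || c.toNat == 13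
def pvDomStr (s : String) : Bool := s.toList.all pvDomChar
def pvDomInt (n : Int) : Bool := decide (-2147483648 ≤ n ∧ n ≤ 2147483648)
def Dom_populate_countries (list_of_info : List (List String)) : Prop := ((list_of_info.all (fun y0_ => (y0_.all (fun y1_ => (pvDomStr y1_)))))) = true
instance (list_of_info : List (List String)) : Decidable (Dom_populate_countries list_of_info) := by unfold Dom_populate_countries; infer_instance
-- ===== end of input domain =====

-- B replaces A's branching dict-and-counter loop by rank-by-first-occurrence: key column,
-- set of distinct keys sorted by first index, then 1-based ranks; alternative algorithm, same result.


-- ===== PORT A =====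
def populate_countries (list_of_info : List (List String)) : List (String × Int) :=
  (list_of_info.foldl
    (fun (st : PySem.Dict String Int × Int) list_item =>
      match PySem.List.pyGet? list_item 3 with    -- list_item[3]; none = IndexError (excluded by Pre_)
      | none => st
      | some country =>
        if st.1.contains country = false then
          (st.1.insert country (st.2 + 1), st.2 + 1)
        else st)
    (PySem.Dict.empty, 0)).1.items

-- ===== PORT B =====
def populate_countries_alt (list_of_info : List (List String)) : List (String × Int) :=
  let keys := list_of_info.map (fun list_item => (PySem.List.pyGet? list_item 3).getD "")
  let distinct := PySem.List.sorted (PySem.Set.ofList keys)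
      (fun c => (PySem.List.index? keys c).getD 0)
  (PySem.List.enumerate distinct 0).map (fun p => (p.2, p.1 + 1))

-- ===== PRECONDITION & SPEC =====
-- Pre_ excludes exactly the inputs on which A raises IndexError: some row has fewer than 4 entries.
def Pre_populate_countries (list_of_info : List (List String)) : Prop :=
  ∀ list_item ∈ list_of_info, 4 ≤ list_item.length
instance (list_of_info : List (List String)) : Decidable (Pre_populate_countries list_of_info) := by
  unfold Pre_populate_countries; infer_instance
def pvWitness_populate_countries : List (List String) :=
  [["Rex", "3", "Lab", "USA"], ["Ina", "5", "Pug", "Chile"], ["Bo", "2", "Mix", "USA"]]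

def Spec_populate_countries (list_of_info : List (List String)) (out : List (String × Int)) : Prop := out = populate_countries_alt list_of_info
instance (list_of_info : List (List String)) (out : List (String × Int)) : Decidable (Spec_populate_countries list_of_info out) := by unfold Spec_populate_countries; infer_instance

-- ===== CLAIM (what is proved, stated in full; the proofs are below) =====
def Claim_equal_populate_countries : Prop := ∀ (list_of_info : List (List String)), Dom_populate_countries list_of_info → Pre_populate_countries list_of_info → Spec_populate_countries list_of_info (populate_countries list_of_info)

-- ===== LEMMAS AND PROOFS =====

-- the key extracted from a row (under Pre_ this is row[3])
def pvKey (list_item : List String) : String :=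
  (PySem.List.pyGet? list_item 3).getD ""

-- the dict A has after having seen exactly the distinct countries `seen` (in order)
def pvMkd (seen : List String) : PySem.Dict String Int :=
  PySem.Dict.mk ((PySem.List.enumerate seen 1).map (fun p => (p.2, p.1)))

lemma pvKeys_mkd (seen : List String) : (pvMkd seen).keys = seen := by
  simp [pvMkd, PySem.Dict.keys, List.map_map, Function.comp_def,
    PySem.List.map_snd_enumerate]

lemma pvContains_mkd (seen : List String) (k : String) :
    (pvMkd seen).contains k = decide (k ∈ seen) := by
  rw [PySem.Dict.contains_eq_decide_mem_keys, pvKeys_mkd]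

lemma pvMkd_append (seen : List String) (k : String) (hk : k ∉ seen) :
    (pvMkd seen).insert k ((seen.length : Int) + 1) = pvMkd (seen ++ [k]) := by
  have hc : (pvMkd seen).contains k = false := by rw [pvContains_mkd]; simp [hk]
  apply PySem.Dict.ext
  rw [PySem.Dict.items_insert, hc, if_neg (by simp)]
  show _ ++ _ = (PySem.List.enumerate (seen ++ [k]) 1).map _
  rw [PySem.List.enumerate_append]
  simp [pvMkd, PySem.List.enumerate, add_comm]

lemma pvFold_inv (l : List (List String)) (seen : List String)
    (hl : ∀ item ∈ l, 4 ≤ item.length) :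
    l.foldl
      (fun (st : PySem.Dict String Int × Int) list_item =>
        match PySem.List.pyGet? list_item 3 with
        | none => st
        | some country =>
          if st.1.contains country = false then
            (st.1.insert country (st.2 + 1), st.2 + 1)
          else st)
      (pvMkd seen, (seen.length : Int)) =
    (pvMkd (PySem.Set.update seen (l.map pvKey)),
     ((PySem.Set.update seen (l.map pvKey)).length : Int)) := by
  induction l generalizing seen with
  | nil => simp [PySem.Set.update]
  | cons item rest ih =>
    have h4 : 3 < item.length := by have := hl item (by simp); omega
    have hget : PySem.List.pyGet? item (3 : Int) = some item[3] := by
      have h := PySem.List.pyGet?_natCast (xs := item) (n := 3)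
      rw [show ((3:Nat):Int) = (3:Int) by norm_num] at h
      rw [h, List.getElem?_eq_getElem h4]
    have hkey : pvKey item = item[3] := by simp [pvKey, hget]
    have hrest : ∀ it ∈ rest, 4 ≤ it.length := fun it hit => hl it (by simp [hit])
    by_cases hmem : item[3] ∈ seen
    · have hadd : PySem.Set.add seen item[3] = seen := by
        simp [PySem.Set.add, PySem.Set.contains, hmem]
      rw [List.foldl_cons, hget]
      simp only [pvContains_mkd, hmem, decide_true, Bool.true_eq_false, if_false]
      rw [ih seen hrest]
      simp [PySem.Set.update, hkey, hadd]
    · have hadd : PySem.Set.add seen item[3] = seen ++ [item[3]] := by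
        simp [PySem.Set.add, PySem.Set.contains, hmem]
      rw [List.foldl_cons, hget]
      simp only [pvContains_mkd, hmem, decide_false, if_true]
      rw [pvMkd_append seen item[3] hmem]
      have hlen : (((seen ++ [item[3]]).length : Nat) : Int) = (seen.length : Int) + 1 := by
        simp
      rw [← hlen, ih (seen ++ [item[3]]) hrest]
      simp [PySem.Set.update, hkey, hadd]

-- Set.update s t appends exactly the new elements of t, in first-occurrence order
lemma pvUpdate_eq (t : List String) : ∀ (s : PySem.Set String),
    PySem.Set.update s t = s ++ (PySem.Set.ofList t).filter (fun c => !s.contains c) := by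
  induction t with
  | nil => intro s; simp [PySem.Set.update, PySem.Set.ofList]
  | cons x r ih =>
    intro s
    have hofl : PySem.Set.ofList (x :: r) = PySem.Set.update [x] r := by
      simp [PySem.Set.ofList_eq_foldl, PySem.Set.update, PySem.Set.add, PySem.Set.contains]
    have hupd : PySem.Set.update s (x :: r) = PySem.Set.update (PySem.Set.add s x) r := by
      simp [PySem.Set.update]
    rw [hupd, ih, hofl, ih [x]]
    by_cases hx : x ∈ s
    · have hadd : PySem.Set.add s x = s := by
        simp [PySem.Set.add, PySem.Set.contains, hx]
      rw [hadd]
      congr 1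
      rw [List.filter_append]
      have h1 : List.filter (fun c => !s.contains c) [x] = [] := by
        simp [List.filter, PySem.Set.contains, hx]
      rw [h1, List.nil_append, List.filter_filter]
      apply List.filter_congr
      intro c _
      by_cases hcx : c = x
      · subst hcx; simp [PySem.Set.contains, hx]
      · simp [PySem.Set.contains, hcx]
    · have hadd : PySem.Set.add s x = s ++ [x] := by
        simp [PySem.Set.add, PySem.Set.contains, hx]
      rw [hadd, List.append_assoc]
      congr 1
      rw [List.filter_append]
      have h1 : List.filter (fun c => !s.contains c) [x] = [x] := by
        simp [List.filter, PySem.Set.contains, hx]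
      rw [h1, List.filter_filter]
      congr 1
      apply List.filter_congr
      intro c _
      by_cases hcx : c = x
      · subst hcx; simp [PySem.Set.contains]
      · simp [PySem.Set.contains, hcx]

lemma pvOfList_cons (x : String) (r : List String) :
    PySem.Set.ofList (x :: r) = x :: (PySem.Set.ofList r).filter (fun c => !(c == x)) := by
  have h : PySem.Set.ofList (x :: r) = PySem.Set.update [x] r := by
    simp [PySem.Set.ofList_eq_foldl, PySem.Set.update, PySem.Set.add, PySem.Set.contains]
  rw [h, pvUpdate_eq]
  simp only [PySem.Set.contains, List.contains_cons, List.contains_nil, List.cons_append,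
    List.nil_append, Bool.or_false]

lemma pvIndex_cons_self (k : String) (t : List String) :
    PySem.List.index? (k :: t) k = some 0 := by
  simp [PySem.List.index?, List.idxOf?_cons]

lemma pvIndex_cons_ne (k a : String) (t : List String) (h : a ≠ k) :
    PySem.List.index? (k :: t) a = (PySem.List.index? t a).map (· + 1) := by
  simp [PySem.List.index?, List.idxOf?_cons]
  exact fun hh => h hh.symm

lemma pvIndex_mem (t : List String) (a : String) (h : a ∈ t) :
    ∃ i, PySem.List.index? t a = some i := by
  simp [PySem.List.index?]
  exact Option.isSome_iff_exists.mp (List.isSome_idxOf?.mpr h)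

-- the distinct keys, in first-occurrence order, are strictly increasing in first index
lemma pvPairwise_idx (keys : List String) :
    (PySem.Set.ofList keys).Pairwise
      (fun a b => ((PySem.List.index? keys a).getD 0) < ((PySem.List.index? keys b).getD 0)) := by
  induction keys with
  | nil => simp [PySem.Set.ofList]
  | cons k t ih =>
    rw [pvOfList_cons]
    constructor
    · intro b hb
      have hbne : b ≠ k := by
        have := (List.mem_filter.mp hb).2; simpa using this
      have hbmem : b ∈ t := by
        have := (List.mem_filter.mp hb).1
        exact (PySem.Set.mem_ofList t b).mp this
      obtain ⟨i, hi⟩ := pvIndex_mem t b hbmem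
      rw [pvIndex_cons_self, pvIndex_cons_ne k b t hbne, hi]
      simp
    · have hp := List.Pairwise.filter (fun c => !(c == k)) ih
      apply hp.imp_of_mem
      intro a b ha hb hab
      have hane : a ≠ k := by have := (List.mem_filter.mp ha).2; simpa using this
      have hbne : b ≠ k := by have := (List.mem_filter.mp hb).2; simpa using this
      have hamem : a ∈ t := (PySem.Set.mem_ofList t a).mp (List.mem_filter.mp ha).1
      have hbmem : b ∈ t := (PySem.Set.mem_ofList t b).mp (List.mem_filter.mp hb).1
      obtain ⟨i, hi⟩ := pvIndex_mem t a hamem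
      obtain ⟨j, hj⟩ := pvIndex_mem t b hbmem
      rw [pvIndex_cons_ne k a t hane, pvIndex_cons_ne k b t hbne, hi, hj]
      rw [hi, hj] at hab
      simpa using Nat.add_lt_add_right (by simpa using hab) 1

lemma pvSorted_id (keys : List String) :
    PySem.List.sorted (PySem.Set.ofList keys)
      (fun c => (PySem.List.index? keys c).getD 0) = PySem.Set.ofList keys :=
  PySem.List.sorted_eq_of_perm_of_pairwise_lt _ _ _ (List.Perm.refl _) (pvPairwise_idx keys)

lemma pvEnum_shift (s : List String) : ∀ (n : Int),
    (PySem.List.enumerate s (n + 1)).map (fun p => (p.2, p.1)) =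
    (PySem.List.enumerate s n).map (fun p => (p.2, p.1 + 1)) := by
  induction s with
  | nil => intro n; simp [PySem.List.enumerate]
  | cons x r ih => intro n; simp [PySem.List.enumerate, ih (n + 1)]

-- ===== VERDICT (by name: the statement is the Claim_ definition above) =====
theorem populate_countries_spec : Claim_equal_populate_countries := by
  intro l _ hpre
  show populate_countries l = populate_countries_alt l
  have h0 : (PySem.Dict.empty : PySem.Dict String Int) = pvMkd [] := rfl
  unfold populate_countries
  rw [h0]
  have hfold := pvFold_inv l [] hpre
  simp only [List.length_nil, Nat.cast_zero] at hfold
  rw [hfold]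
  have hupd : PySem.Set.update [] (l.map pvKey) =
      PySem.Set.ofList (l.map pvKey) := by
    simp [PySem.Set.update, PySem.Set.ofList_eq_foldl]
  show (pvMkd (PySem.Set.update [] (l.map pvKey))).items = _
  rw [hupd]
  show (pvMkd (PySem.Set.ofList (l.map pvKey))).items =
    (PySem.List.enumerate (PySem.List.sorted (PySem.Set.ofList (l.map pvKey))
        (fun c => (PySem.List.index? (l.map pvKey) c).getD 0)) 0).map (fun p => (p.2, p.1 + 1))
  rw [pvSorted_id, ← pvEnum_shift _ 0]
  show (PySem.List.enumerate _ (1 : Int)).map (fun p => (p.2, p.1)) =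
    (PySem.List.enumerate _ ((0 : Int) + 1)).map (fun p => (p.2, p.1))
  norm_num
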